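-- pv_equiv track=rewrite | github.com/mean71/codingtest | 프로그래머스/3/12987. 숫자 게임/숫자 게임.py | solution
-- ===== SOURCE A (Python) =====
-- import heapq
--
-- def solution(A:list, B:list) -> int:
--     '''그리디
--     A,B팀의 각 팀원이 무작위번호를 부여받아 한번씩 경기
--     각 경기당 각팀에서 한명씩 나와 번호를 비교하여 큰쪽이 승리하고 1점 득점
--     같다면 무득점
--     A팀은 자신의 출전순서를 B팀에게 공개
--     B팀은 그걸 보고 자신들의 최종 승점을 가장 높이는 방법으로 정했다
--     이때 B팀이 얻는 최대승점
--     args: 출전순으로 번호가 나열된 배열 A와 아닌 배열 B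
--         A(list[int]): 1 <= len(A)==len(B) <= 10^5
--         B(list[int]): 1 <= (A[i] or B[i]) <= 10^9
--     return (int):
--     '''
--     A = [-i for i in A]
--     B = [-i for i in B]
--     heapq.heapify(A)
--     heapq.heapify(B)
--     cnt = 0
--
--     while B:
--         b = heapq.heappop(B)
--         while A:
--             if b < heapq.heappop(A):
--                 cnt += 1
--                 break
--
--     return cnt
-- ===== SOURCE B (Python) =====
-- def solution(A: list, B: list) -> int:
--     # Canonical one-pass greedy from the SMALL end: sort both ascending and
--     # spend the smallest B member able to beat the smallest still-unbeaten A member.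
--     # The counter i is simultaneously the score and the index of the next A member to beat.
--     As = sorted(A)
--     i = 0
--     for b in sorted(B):
--         if i < len(As) and As[i] < b:
--             i += 1
--     return i
-- ===== Notes on version B (the rewrite author's own statement) =====
-- stated objective: simpler
-- what changed: Replaces the two max-heaps and the nested pop-and-discard loops (matching each largest B with the largest beatable A) with two ascending sorts and a single guarded fold whose counter doubles as score and pointer, matching each smallest winning B with the smallest unbeaten A.
import Mathlib
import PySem

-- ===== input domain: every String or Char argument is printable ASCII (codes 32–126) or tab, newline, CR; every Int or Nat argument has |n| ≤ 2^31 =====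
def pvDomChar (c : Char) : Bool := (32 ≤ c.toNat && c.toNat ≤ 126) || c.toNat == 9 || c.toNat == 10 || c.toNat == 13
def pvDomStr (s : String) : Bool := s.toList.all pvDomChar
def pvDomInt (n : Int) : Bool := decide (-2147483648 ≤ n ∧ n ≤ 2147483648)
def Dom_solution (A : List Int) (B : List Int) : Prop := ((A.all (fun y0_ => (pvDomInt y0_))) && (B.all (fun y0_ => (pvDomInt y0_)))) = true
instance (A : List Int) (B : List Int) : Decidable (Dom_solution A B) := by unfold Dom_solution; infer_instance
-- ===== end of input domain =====

-- B replaces A's two max-heaps and nested pop-and-discard loops (largest b vs largest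
-- beatable a) by the mirror greedy: two ascending sorts and ONE guarded fold whose counter
-- is both the score and the index of the next unbeaten A member (simpler, same O(n log n)).
-- Neither version mutates its caller's arguments (A rebinds local names only).

-- ===== PORT A =====
-- heapq model: a min-heap is represented by its ascending sorted list; heapify = sort and
-- heappop returns the head (the minimum) — exact on every value Python's heappop returns.
-- inner 'while A:' loop of A: pop a from the heap; if b < a score and break, else keep popping.
def pvInnerA (b : Int) : List Int → Int → (List Int × Int)
  | [], cnt => ([], cnt)
  | a :: rest, cnt => if b < a then (rest, cnt + 1) else pvInnerA b rest cnt

-- outer 'while B:' loop of A: pop b (the minimum of the negated heap), run the inner loop.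
def pvOuterA : List Int → List Int → Int → Int
  | [], _, cnt => cnt
  | b :: bs, heapA, cnt =>
      let s := pvInnerA b heapA cnt
      pvOuterA bs s.1 s.2

def solution (A : List Int) (B : List Int) : Int :=
  let negA := PySem.List.sorted (A.map (fun i => -i)) (fun x => x) false
  let negB := PySem.List.sorted (B.map (fun i => -i)) (fun x => x) false
  pvOuterA negB negA 0

-- ===== PORT B =====
-- Source B's loop body 'if i < len(As) and As[i] < b: i += 1'; i is kept as a Nat because
-- Python's i starts at 0 and only ever grows, and the guard makes As[i] an in-range index,
-- so List.getD is exact there.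
def pvStepB (As : List Int) (i : Nat) (b : Int) : Nat :=
  if i < As.length ∧ As.getD i 0 < b then i + 1 else i

def solution_alt (A : List Int) (B : List Int) : Int :=
  let As := PySem.List.sorted A (fun x => x) false
  ((PySem.List.sorted B (fun x => x) false).foldl (pvStepB As) 0 : Nat)

-- ===== PRECONDITION & SPEC =====
def Spec_solution (A : List Int) (B : List Int) (out : Int) : Prop := out = solution_alt A B
instance (A : List Int) (B : List Int) (out : Int) : Decidable (Spec_solution A B out) := by unfold Spec_solution; infer_instance

-- ===== CLAIM (what is proved, stated in full; the proofs are below) =====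
def Claim_equal_solution : Prop := ∀ (A : List Int) (B : List Int), Dom_solution A B → Spec_solution A B (solution A B)

-- ===== LEMMAS AND PROOFS =====

-- Proof-side intermediate form of A: descending two-pointer greedy over plain sorted lists.
def pvSkipGE (b : Int) : List Int → List Int
  | [] => []
  | a :: rest => if a ≥ b then pvSkipGE b rest else a :: rest

def pvTwoPtr : List Int → List Int → Int → Int
  | [], _, cnt => cnt
  | b :: bs, as_, cnt =>
      match pvSkipGE b as_ with
      | [] => pvTwoPtr bs [] cnt
      | _ :: rest => pvTwoPtr bs rest (cnt + 1)

-- ascending sort of the negated list = negation of the descending sort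
lemma sorted_neg (xs : List Int) :
    PySem.List.sorted (xs.map (fun i => -i)) (fun x => x) false
      = (PySem.List.sorted xs (fun x => x) true).map (fun i => -i) := by
  apply PySem.List.sorted_id_eq_of_perm_of_pairwise
  · exact (PySem.List.sorted_perm xs (fun x => x) true).map _
  · have h := PySem.List.sorted_pairwise_rev (xs := xs) (key := fun x => x)
    exact (List.pairwise_map).mpr (h.imp (fun hba => by omega))

-- A's inner loop on the negated heap = the skip-then-score step
lemma inner_eq_skip (b : Int) (L : List Int) (cnt : Int) :
    pvInnerA (-b) (L.map (fun i => -i)) cnt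
      = match pvSkipGE b L with
        | [] => ([], cnt)
        | _ :: rest => (rest.map (fun i => -i), cnt + 1) := by
  induction L with
  | nil => simp [pvInnerA, pvSkipGE]
  | cons a rest ih =>
    simp only [List.map_cons, pvInnerA, pvSkipGE]
    by_cases h : a < b
    · rw [if_pos (by omega), if_neg (by omega)]
    · rw [if_neg (by omega), if_pos (by omega), ih]

-- A's outer loop = the two-pointer loop, the heap being the negation of the remaining suffix
lemma outer_eq_twoPtr (Bs : List Int) : ∀ (L : List Int) (cnt : Int),
    pvOuterA (Bs.map (fun i => -i)) (L.map (fun i => -i)) cnt = pvTwoPtr Bs L cnt := by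
  induction Bs with
  | nil => intro L cnt; simp [pvOuterA, pvTwoPtr]
  | cons b bs ih =>
    intro L cnt
    simp only [List.map_cons, pvOuterA, pvTwoPtr, inner_eq_skip]
    cases h : pvSkipGE b L with
    | nil => simpa [h] using ih [] cnt
    | cons a rest => simpa [h] using ih rest (cnt + 1)

-- descending sort = reverse of the ascending sort (values only; Int, identity key)
lemma sorted_rev_eq_reverse (xs : List Int) :
    PySem.List.sorted xs (fun x => x) true = (PySem.List.sorted xs (fun x => x) false).reverse := by
  have h1 : ((PySem.List.sorted xs (fun x => x) true).reverse).Perm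
      (PySem.List.sorted xs (fun x => x) false) :=
    ((List.reverse_perm _).trans (PySem.List.sorted_perm xs (fun x => x) true)).trans
      (PySem.List.sorted_perm xs (fun x => x) false).symm
  have h2 : ((PySem.List.sorted xs (fun x => x) true).reverse).Pairwise (· ≤ ·) :=
    List.pairwise_reverse.mpr
      ((PySem.List.sorted_pairwise_rev (xs := xs) (key := fun x => x)).imp (fun h => h))
  have h3 : (PySem.List.sorted xs (fun x => x) false).Pairwise (· ≤ ·) :=
    (PySem.List.sorted_pairwise (xs := xs) (key := fun x => x)).imp (fun h => h)
  have heq : (PySem.List.sorted xs (fun x => x) true).reverse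
      = PySem.List.sorted xs (fun x => x) false :=
    h1.eq_of_pairwise (fun a b _ _ hab hba => le_antisymm hab hba) h2 h3
  calc PySem.List.sorted xs (fun x => x) true
      = ((PySem.List.sorted xs (fun x => x) true).reverse).reverse := (List.reverse_reverse _).symm
    _ = (PySem.List.sorted xs (fun x => x) false).reverse := by rw [heq]

-- ===== B-side fold facts =====

-- once the pointer is past the end it never moves
lemma fold_stuck (L : List Int) (β : List Int) : ∀ i, L.length ≤ i →
    β.foldl (pvStepB L) i = i := by
  induction β with
  | nil => intro i _; rfl
  | cons x xs ih =>
    intro i hi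
    have h : pvStepB L i x = i := by unfold pvStepB; rw [if_neg (fun hc => by omega)]
    simp only [List.foldl_cons, h]; exact ih i hi

-- the pointer never exceeds the list length
lemma fold_le (L : List Int) (β : List Int) : ∀ i, i ≤ L.length →
    β.foldl (pvStepB L) i ≤ L.length := by
  induction β with
  | nil => intro i hi; exact hi
  | cons x xs ih =>
    intro i hi
    simp only [List.foldl_cons]
    apply ih
    unfold pvStepB; split_ifs with h
    · omega
    · exact hi

-- members of a high tail ≥ b are invisible to the fold when every processed value is ≤ b
lemma step_append (L H : List Int) (b : Int) (hH : ∀ y ∈ H, b ≤ y)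
    (x : Int) (hx : x ≤ b) (i : Nat) : pvStepB (L ++ H) i x = pvStepB L i x := by
  unfold pvStepB
  by_cases hi : i < L.length
  · rw [List.getD_append _ _ _ _ hi]
    exact if_congr ⟨fun hc => ⟨hi, hc.2⟩, fun hc => ⟨by simp; omega, hc.2⟩⟩ rfl rfl
  · have hc1 : ¬ (i < (L ++ H).length ∧ (L ++ H).getD i 0 < x) := by
      rintro ⟨hlen, hlt⟩
      have hge : L.length ≤ i := by omega
      have hmem : (L ++ H).getD i 0 ∈ H := by
        have he : (L ++ H).getD i 0 = H.getD (i - L.length) 0 := by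
          simp [List.getD, List.getElem?_append_right hge]
        have hlt2 : i - L.length < H.length := by
          have := hlen; simp at this; omega
        rw [he]
        simp [List.getD, List.getElem?_eq_getElem hlt2]
        try exact List.getElem_mem _
      have := hH _ hmem
      omega
    rw [if_neg hc1, if_neg (fun hc => hi hc.1)]

lemma fold_append (L H : List Int) (b : Int) (hH : ∀ y ∈ H, b ≤ y) (β : List Int)
    (hβ : ∀ x ∈ β, x ≤ b) : ∀ i, β.foldl (pvStepB (L ++ H)) i = β.foldl (pvStepB L) i := by
  induction β with
  | nil => intro i; rfl
  | cons x xs ih =>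
    intro i
    simp only [List.foldl_cons, step_append L H b hH x (hβ x (by simp)) i]
    exact ih (fun y hy => hβ y (by simp [hy])) _

-- the fold over L.dropLast is the fold over L capped at |L| - 1
lemma fold_dropLast (L : List Int) (hL : L ≠ []) (β : List Int) : ∀ i, i ≤ L.length - 1 →
    β.foldl (pvStepB L.dropLast) i = min (β.foldl (pvStepB L) i) (L.length - 1) := by
  have hlen : L.dropLast.length = L.length - 1 := by simp
  have hpos : 0 < L.length := List.length_pos_iff.mpr hL
  induction β with
  | nil => intro i hi; simp; omega
  | cons x xs ih =>
    intro i hi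
    by_cases hcase : i < L.length - 1
    · have hget : L.dropLast.getD i 0 = L.getD i 0 := by
        simp [List.getD, List.getElem?_dropLast, if_pos (by omega : i < L.length - 1)]
      have hstep : pvStepB L.dropLast i x = pvStepB L i x := by
        unfold pvStepB
        rw [hget, hlen]
        exact if_congr ⟨fun hc => ⟨by omega, hc.2⟩, fun hc => ⟨hcase, hc.2⟩⟩ rfl rfl
      simp only [List.foldl_cons, hstep]
      apply ih
      have hb : pvStepB L i x ≤ i + 1 := by unfold pvStepB; split_ifs <;> omega
      omega
    · have hieq : i = L.length - 1 := by omega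
      have hstuck' : pvStepB L.dropLast i x = i := by
        unfold pvStepB; rw [if_neg (fun hc => by omega)]
      simp only [List.foldl_cons, hstuck']
      by_cases hs : pvStepB L i x = i
      · rw [hs]; exact ih i hi
      · have hsi : pvStepB L i x = i + 1 := by
          unfold pvStepB at hs ⊢; split_ifs at hs ⊢ <;> omega
        rw [hsi]
        rw [fold_stuck L.dropLast xs i (by omega), fold_stuck L xs (i + 1) (by omega)]
        omega

-- pulling the count out of pvTwoPtr
lemma twoPtr_add (β : List Int) : ∀ as_ c, pvTwoPtr β as_ c = c + pvTwoPtr β as_ 0 := by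
  induction β with
  | nil => intro as_ c; simp [pvTwoPtr]
  | cons b bs ih =>
    intro as_ c
    cases h : pvSkipGE b as_ with
    | nil => simp only [pvTwoPtr, h]; rw [ih [] c, ih [] 0]
    | cons a rest => simp only [pvTwoPtr, h]; rw [ih rest (c + 1), ih rest (0 + 1)]; ring

lemma twoPtr_nil (β : List Int) : ∀ c, pvTwoPtr β [] c = c := by
  induction β with
  | nil => intro c; rfl
  | cons b bs ih => intro c; simp only [pvTwoPtr, pvSkipGE]; exact ih c

lemma skipGE_append (b : Int) (H : List Int) (hH : ∀ y ∈ H, b ≤ y) (l : List Int) :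
    pvSkipGE b (H ++ l) = pvSkipGE b l := by
  induction H with
  | nil => rfl
  | cons y ys ih =>
    simp only [List.cons_append, pvSkipGE, if_pos (by have := hH y (by simp); omega : y ≥ b)]
    exact ih (fun z hz => hH z (by simp [hz]))

-- a sorted list's dropWhile (< b) part consists of values ≥ b
lemma ge_of_mem_dropWhile (b : Int) : ∀ (α : List Int), α.Pairwise (· ≤ ·) →
    ∀ y ∈ α.dropWhile (fun a => decide (a < b)), b ≤ y := by
  intro α
  induction α with
  | nil => intro _ y hy; simp [List.dropWhile] at hy
  | cons a t ih =>
    intro hp y hy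
    rcases List.pairwise_cons.mp hp with ⟨ha, ht⟩
    by_cases h : a < b
    · rw [List.dropWhile_cons_of_pos (by simpa using h)] at hy
      exact ih ht y hy
    · rw [List.dropWhile_cons_of_neg (by simpa using h)] at hy
      rcases List.mem_cons.mp hy with rfl | hyt
      · omega
      · have := ha y hyt; omega

-- ===== the main bridge: descending two-pointer = ascending one-pass fold =====
lemma twoPtr_eq_fold (δ : List Int) : ∀ α : List Int,
    δ.Pairwise (fun a b => b ≤ a) → α.Pairwise (· ≤ ·) →
    pvTwoPtr δ α.reverse 0 = ((δ.reverse.foldl (pvStepB α) 0 : Nat) : Int) := by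
  induction δ with
  | nil => intro α _ _; simp [pvTwoPtr]
  | cons b δ' ih =>
    intro α hδ hα
    have hδ'le : ∀ x ∈ δ'.reverse, x ≤ b := by
      intro x hx; exact (List.pairwise_cons.mp hδ).1 x (List.mem_reverse.mp hx)
    have hδ'p : δ'.Pairwise (fun a b => b ≤ a) := (List.pairwise_cons.mp hδ).2
    -- split α at b
    set αlow := α.takeWhile (fun a => decide (a < b)) with hαlow
    set αhigh := α.dropWhile (fun a => decide (a < b)) with hαhigh
    have hsplit : α = αlow ++ αhigh := (List.takeWhile_append_dropWhile).symm
    have hlow_lt : ∀ a ∈ αlow, a < b := by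
      intro a ha; simpa using List.mem_takeWhile_imp ha
    have hhigh_ge : ∀ y ∈ αhigh, b ≤ y := by
      intro y hy; exact ge_of_mem_dropWhile b α hα y (by rw [← hαhigh]; exact hy)
    have hrev : α.reverse = αhigh.reverse ++ αlow.reverse := by
      rw [hsplit, List.reverse_append]
    have hskip : pvSkipGE b α.reverse = pvSkipGE b αlow.reverse := by
      rw [hrev]
      exact skipGE_append b αhigh.reverse (fun y hy => hhigh_ge y (List.mem_reverse.mp hy)) _
    have hfoldapp : ∀ i, δ'.reverse.foldl (pvStepB α) i = δ'.reverse.foldl (pvStepB αlow) i := by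
      intro i; conv_lhs => rw [hsplit]
      exact fold_append αlow αhigh b hhigh_ge δ'.reverse hδ'le i
    by_cases hLne : αlow = []
    · -- no A member is below b: nothing ever scores
      have hskip0 : pvSkipGE b α.reverse = [] := by rw [hskip, hLne]; rfl
      have hlhs : pvTwoPtr (b :: δ') α.reverse 0 = 0 := by
        simp only [pvTwoPtr, hskip0]
        exact twoPtr_nil δ' 0
      rw [hlhs, List.reverse_cons, List.foldl_append, hfoldapp, hLne]
      rw [fold_stuck [] δ'.reverse 0 (by simp)]
      have hb0 : pvStepB α 0 b = 0 := by
        unfold pvStepB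
        rw [if_neg]
        rintro ⟨hlen, hlt⟩
        have h0 : α.getD 0 0 ∈ α := by
          simp [List.getD, List.getElem?_eq_getElem hlen]
          try exact List.getElem_mem _
        have hall : ∀ y ∈ α, b ≤ y := by
          intro y hy
          apply hhigh_ge
          rw [hsplit, hLne] at hy
          simpa using hy
        have hge : b ≤ α.getD 0 0 := hall _ h0
        omega
      simp [hb0]
    · -- αlow nonempty: b scores exactly once, recurse on αlow.dropLast
      have hm : 0 < αlow.length := List.length_pos_iff.mpr hLne
      have hrevlow : αlow.reverse = αlow.getLast hLne :: αlow.dropLast.reverse := by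
        conv_lhs => rw [← List.dropLast_append_getLast hLne]
        rw [List.reverse_append]
        rfl
      have hheadlt : αlow.getLast hLne < b := hlow_lt _ (List.getLast_mem hLne)
      have hskip1 : pvSkipGE b α.reverse = αlow.getLast hLne :: αlow.dropLast.reverse := by
        rw [hskip, hrevlow]
        simp only [pvSkipGE]
        rw [if_neg (by omega)]
      have hstep1 : pvTwoPtr (b :: δ') α.reverse 0 = pvTwoPtr δ' αlow.dropLast.reverse 1 := by
        simp [pvTwoPtr, hskip1]
      have hsub : List.Sublist αlow.dropLast α := by
        refine (List.dropLast_sublist αlow).trans ?_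
        rw [hαlow]; exact List.takeWhile_sublist _
      have hdlp : αlow.dropLast.Pairwise (· ≤ ·) := List.Pairwise.sublist hsub hα
      rw [hstep1, twoPtr_add δ' αlow.dropLast.reverse 1, ih αlow.dropLast hδ'p hdlp]
      -- right-hand side
      rw [List.reverse_cons, List.foldl_append, hfoldapp]
      set j := δ'.reverse.foldl (pvStepB αlow) 0 with hj
      have hjle : j ≤ αlow.length := fold_le αlow δ'.reverse 0 (by omega)
      have hjd : δ'.reverse.foldl (pvStepB αlow.dropLast) 0 = min j (αlow.length - 1) :=
        fold_dropLast αlow hLne δ'.reverse 0 (by omega)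
      have hstep : pvStepB α j b = (if j < αlow.length then j + 1 else j) := by
        unfold pvStepB
        by_cases hjm : j < αlow.length
        · have h1 : j < α.length := by rw [hsplit]; simp; omega
          have h2 : α.getD j 0 < b := by
            have hmem : α.getD j 0 ∈ αlow := by
              rw [hsplit]
              rw [List.getD_append _ _ _ _ hjm]
              simp [List.getD, List.getElem?_eq_getElem hjm]
              try exact List.getElem_mem _
            exact hlow_lt _ hmem
          rw [if_pos ⟨h1, h2⟩, if_pos hjm]
        · rw [if_neg hjm, if_neg]
          rintro ⟨hlen, hlt⟩
          have hge2 : αlow.length ≤ j := by omega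
          have hmem : α.getD j 0 ∈ αhigh := by
            rw [hsplit]
            have he : (αlow ++ αhigh).getD j 0 = αhigh.getD (j - αlow.length) 0 := by
              simp [List.getD, List.getElem?_append_right hge2]
            have hlt2 : j - αlow.length < αhigh.length := by
              rw [hsplit] at hlen; simp at hlen; omega
            rw [he]
            simp [List.getD, List.getElem?_eq_getElem hlt2]
            try exact List.getElem_mem _
          have := hhigh_ge _ hmem
          omega
      rw [List.foldl_cons, List.foldl_nil, hjd, hstep]
      split_ifs with hjm
      · have hmin : min j (αlow.length - 1) = j := by omega
        rw [hmin]; push_cast; ring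
      · have hjeq : j = αlow.length := by omega
        have hmin : min j (αlow.length - 1) = αlow.length - 1 := by omega
        rw [hmin, hjeq]
        push_cast [hm]
        omega

-- ===== VERDICT (by name: the statement is the Claim_ definition above) =====
theorem solution_spec : Claim_equal_solution := by
  intro A B _
  show solution A B = solution_alt A B
  simp only [solution, solution_alt, sorted_neg]
  rw [outer_eq_twoPtr]
  rw [sorted_rev_eq_reverse A, sorted_rev_eq_reverse B]
  have h := twoPtr_eq_fold ((PySem.List.sorted B (fun x => x) false).reverse)
    (PySem.List.sorted A (fun x => x) false)
    (by
      rw [List.pairwise_reverse]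
      exact (PySem.List.sorted_pairwise (xs := B) (key := fun x => x)).imp (fun h => h))
    ((PySem.List.sorted_pairwise (xs := A) (key := fun x => x)).imp (fun h => h))
  rw [h, List.reverse_reverse]
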